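-- pv_equiv track=rewrite | github.com/elliotttmiller/aura | backend/ai_orchestrator.py | _determine_detail_level
-- ===== SOURCE A (Python) =====
-- def _determine_detail_level(prompt: str) -> str:
--     """Determine hyperrealistic detail level required."""
--     prompt_lower = prompt.lower()
--
--     ultra_keywords = ["ultra", "maximum", "finest", "ultimate", "hyperrealistic"]
--     high_keywords = ["intricate", "detailed", "complex", "elaborate", "ornate", "filigree"]
--     medium_keywords = ["decorated", "patterned", "textured", "styled"]
--     low_keywords = ["simple", "clean", "minimal", "plain", "basic"]
--
--     if any(word in prompt_lower for word in ultra_keywords):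
--         return "ultra"
--     elif any(word in prompt_lower for word in high_keywords):
--         return "high"
--     elif any(word in prompt_lower for word in medium_keywords):
--         return "medium"
--     elif any(word in prompt_lower for word in low_keywords):
--         return "low"
--     else:
--         return "high"  # Default to high for hyperrealistic system
-- ===== SOURCE B (Python) =====
-- # Single pass over one flat priority table: keep the highest-ranked matching
-- # keyword's label; default label "high" when nothing matches.
-- _TABLE = [
--     ("ultra", 4, "ultra"), ("maximum", 4, "ultra"), ("finest", 4, "ultra"),
--     ("ultimate", 4, "ultra"), ("hyperrealistic", 4, "ultra"),
--     ("intricate", 3, "high"), ("detailed", 3, "high"), ("complex", 3, "high"),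
--     ("elaborate", 3, "high"), ("ornate", 3, "high"), ("filigree", 3, "high"),
--     ("decorated", 2, "medium"), ("patterned", 2, "medium"),
--     ("textured", 2, "medium"), ("styled", 2, "medium"),
--     ("simple", 1, "low"), ("clean", 1, "low"), ("minimal", 1, "low"),
--     ("plain", 1, "low"), ("basic", 1, "low"),
-- ]
--
-- def _determine_detail_level(prompt: str) -> str:
--     p = prompt.lower()
--     best, name = 0, "high"
--     for word, rank, label in _TABLE:
--         if rank > best and word in p:
--             best, name = rank, label
--     return name
-- ===== Notes on version B (the rewrite author's own statement) =====
-- stated objective: alternative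
-- what changed: Replaces the four short-circuiting category checks by a single fold over one flat (keyword, rank, label) table that keeps the highest-ranked matching keyword, defaulting to 'high'.
import Mathlib
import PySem

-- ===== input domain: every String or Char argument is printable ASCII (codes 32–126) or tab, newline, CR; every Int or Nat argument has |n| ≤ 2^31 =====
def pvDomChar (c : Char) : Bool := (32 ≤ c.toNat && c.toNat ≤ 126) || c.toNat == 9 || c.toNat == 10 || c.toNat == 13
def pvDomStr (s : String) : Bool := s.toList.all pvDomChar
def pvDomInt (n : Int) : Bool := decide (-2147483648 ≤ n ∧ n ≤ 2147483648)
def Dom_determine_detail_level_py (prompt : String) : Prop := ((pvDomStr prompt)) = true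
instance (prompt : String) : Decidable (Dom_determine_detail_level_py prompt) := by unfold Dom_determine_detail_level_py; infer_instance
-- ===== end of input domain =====

-- B replaces A's four short-circuit category checks with one fold over a flat
-- (keyword, rank, label) priority table keeping the highest-ranked match (alternative decomposition, same cost).


-- ===== PORT A =====
def determine_detail_level_py (prompt : String) : String :=
  let prompt_lower := PySem.Str.lower prompt
  let ultra_keywords := ["ultra", "maximum", "finest", "ultimate", "hyperrealistic"]
  let high_keywords := ["intricate", "detailed", "complex", "elaborate", "ornate", "filigree"]
  let medium_keywords := ["decorated", "patterned", "textured", "styled"]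
  let low_keywords := ["simple", "clean", "minimal", "plain", "basic"]
  if ultra_keywords.any (fun w => PySem.Str.isIn w prompt_lower) then "ultra"
  else if high_keywords.any (fun w => PySem.Str.isIn w prompt_lower) then "high"
  else if medium_keywords.any (fun w => PySem.Str.isIn w prompt_lower) then "medium"
  else if low_keywords.any (fun w => PySem.Str.isIn w prompt_lower) then "low"
  else "high"

-- ===== PORT B =====
def pvTable : List (String × Nat × String) :=
  [("ultra", 4, "ultra"), ("maximum", 4, "ultra"), ("finest", 4, "ultra"),
   ("ultimate", 4, "ultra"), ("hyperrealistic", 4, "ultra"),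
   ("intricate", 3, "high"), ("detailed", 3, "high"), ("complex", 3, "high"),
   ("elaborate", 3, "high"), ("ornate", 3, "high"), ("filigree", 3, "high"),
   ("decorated", 2, "medium"), ("patterned", 2, "medium"),
   ("textured", 2, "medium"), ("styled", 2, "medium"),
   ("simple", 1, "low"), ("clean", 1, "low"), ("minimal", 1, "low"),
   ("plain", 1, "low"), ("basic", 1, "low")]

-- one loop step: keep a higher-ranked matching keyword's (rank, label)
def pvStep (p : String) (st : Nat × String) (e : String × Nat × String) : Nat × String :=
  if st.1 < e.2.1 ∧ PySem.Str.isIn e.1 p = true then (e.2.1, e.2.2) else st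

def determine_detail_level_py_alt (prompt : String) : String :=
  let p := PySem.Str.lower prompt
  (pvTable.foldl (pvStep p) (0, "high")).2

-- ===== PRECONDITION & SPEC =====
def Spec_determine_detail_level_py (prompt : String) (out : String) : Prop := out = determine_detail_level_py_alt prompt
instance (prompt : String) (out : String) : Decidable (Spec_determine_detail_level_py prompt out) := by unfold Spec_determine_detail_level_py; infer_instance

-- ===== CLAIM (what is proved, stated in full; the proofs are below) =====
def Claim_equal_determine_detail_level_py : Prop := ∀ (prompt : String), Dom_determine_detail_level_py prompt → Spec_determine_detail_level_py prompt (determine_detail_level_py prompt)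

-- ===== LEMMAS AND PROOFS =====

-- folding one rank-r keyword group: the state jumps to (r, lbl) iff some keyword matches and r beats the current rank
lemma pv_group_fold (p : String) (r : Nat) (lbl : String) (ws : List String) (st : Nat × String) :
    (ws.map (fun w => (w, r, lbl))).foldl (pvStep p) st
      = if st.1 < r ∧ ws.any (fun w => PySem.Str.isIn w p) = true then (r, lbl) else st := by
  induction ws generalizing st with
  | nil => simp
  | cons w ws ih =>
    simp only [List.map_cons, List.foldl_cons, List.any_cons, pvStep]
    by_cases hw : PySem.Str.isIn w p = true
    · by_cases hb : st.1 < r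
      · rw [if_pos ⟨hb, hw⟩, ih, if_neg (by simp), if_pos ⟨hb, by rw [hw]; rfl⟩]
      · rw [if_neg (by tauto), ih, if_neg (by tauto), if_neg (by tauto)]
    · have hw' : PySem.Str.isIn w p = false := by
        revert hw; cases (PySem.Str.isIn w p) <;> simp
      rw [if_neg (by tauto), ih]
      simp only [hw', Bool.false_or]

lemma pv_table_split : pvTable =
    (["ultra", "maximum", "finest", "ultimate", "hyperrealistic"].map (fun w => (w, 4, "ultra")))
    ++ (["intricate", "detailed", "complex", "elaborate", "ornate", "filigree"].map (fun w => (w, 3, "high")))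
    ++ (["decorated", "patterned", "textured", "styled"].map (fun w => (w, 2, "medium")))
    ++ (["simple", "clean", "minimal", "plain", "basic"].map (fun w => (w, 1, "low"))) := rfl

-- ===== VERDICT (by name: the statement is the Claim_ definition above) =====
theorem determine_detail_level_py_spec : Claim_equal_determine_detail_level_py := by
  intro prompt _
  unfold Spec_determine_detail_level_py
  simp only [determine_detail_level_py, determine_detail_level_py_alt]
  rw [pv_table_split, List.foldl_append, List.foldl_append, List.foldl_append,
      pv_group_fold, pv_group_fold, pv_group_fold, pv_group_fold]
  generalize (["ultra", "maximum", "finest", "ultimate", "hyperrealistic"].any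
      (fun w => PySem.Str.isIn w (PySem.Str.lower prompt))) = a4
  generalize (["intricate", "detailed", "complex", "elaborate", "ornate", "filigree"].any
      (fun w => PySem.Str.isIn w (PySem.Str.lower prompt))) = a3
  generalize (["decorated", "patterned", "textured", "styled"].any
      (fun w => PySem.Str.isIn w (PySem.Str.lower prompt))) = a2
  generalize (["simple", "clean", "minimal", "plain", "basic"].any
      (fun w => PySem.Str.isIn w (PySem.Str.lower prompt))) = a1
  cases a4 <;> cases a3 <;> cases a2 <;> cases a1 <;> simp
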